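-- pv_equiv track=rewrite | github.com/vilkojol/corpus_statistics_and_collocation_analysis | collocation_analyzer.py | keyword_finder
-- ===== SOURCE A (Python) =====
-- def keyword_finder(utterances, keyword):
--     #not used?
--     keyword_positions = []
--     for utterance in utterances:
--         positions = []
--         start = 0
--         while True:
--             pos = utterance.find(keyword, start)
--             if pos == -1:
--                 break
--             positions.append(pos)
--             start = pos + len(keyword)
--         keyword_positions.append(positions)
--     return keyword_positions
-- ===== SOURCE B (Python) =====
-- def keyword_finder(utterances, keyword):
--     # Two-phase per utterance: (1) collect every match position (including
--     # overlapping ones) with a range comprehension, (2) greedily keep the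
--     # non-overlapping ones in a second pass.
--     L = len(keyword)
--     keyword_positions = []
--     for utterance in utterances:
--         matches = [i for i in range(len(utterance) - L + 1)
--                    if utterance.startswith(keyword, i)]
--         positions = []
--         last_end = 0
--         for i in matches:
--             if i >= last_end:
--                 positions.append(i)
--                 last_end = i + L
--         keyword_positions.append(positions)
--     return keyword_positions
-- ===== Notes on version B (the rewrite author's own statement) =====
-- stated objective: alternative
-- what changed: B splits the work into two staged passes per utterance: a range comprehension first collects ALL (possibly overlapping) match positions, then a separate greedy pass with a last_end accumulator filters them to the non-overlapping ones, instead of A's single find-and-jump while loop that interleaves searching and selecting.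
import Mathlib
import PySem

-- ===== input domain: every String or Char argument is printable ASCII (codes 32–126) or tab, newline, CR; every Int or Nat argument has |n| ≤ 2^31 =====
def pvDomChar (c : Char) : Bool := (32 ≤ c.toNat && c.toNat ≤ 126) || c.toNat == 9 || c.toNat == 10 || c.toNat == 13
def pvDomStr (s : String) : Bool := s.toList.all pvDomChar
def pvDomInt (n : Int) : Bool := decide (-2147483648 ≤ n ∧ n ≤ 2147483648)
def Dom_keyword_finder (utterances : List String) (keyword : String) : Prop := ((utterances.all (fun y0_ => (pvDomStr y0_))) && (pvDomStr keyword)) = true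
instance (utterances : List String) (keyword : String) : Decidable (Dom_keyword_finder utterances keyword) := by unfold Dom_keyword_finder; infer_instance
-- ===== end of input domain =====

-- B replaces A's interleaved find-and-jump loop by two staged passes (collect all
-- match positions, then greedily keep the non-overlapping ones); same values, no speed claim.

-- ===== PORT A =====
-- A's 'while True: pos = utterance.find(keyword, start) …' loop; the fuel len+1
-- bounds the iterations, which suffices whenever keyword ≠ "" (the only case Pre_ admits):
-- each iteration strictly increases start and keeps start ≤ len.
def pvFindLoopA (u k : List Char) : Nat → Int → List Int → List Int
  | 0, _, acc => acc
  | fuel+1, start, acc =>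
    let pos := PySem.Chars.findFrom u k start
    if pos = -1 then acc
    else pvFindLoopA u k fuel (pos + (k.length : Int)) (acc ++ [pos])

def keyword_finder (utterances : List String) (keyword : String) : List (List Int) :=
  utterances.map (fun utterance =>
    pvFindLoopA utterance.toList keyword.toList (utterance.toList.length + 1) 0 [])

-- ===== PORT B =====
-- B's comprehension '[i for i in range(len(u) - L + 1) if u.startswith(keyword, i)]';
-- Python's startswith(keyword, i) for the nonnegative i drawn from the range is exactly
-- 'keyword is a prefix of u[i:]', ported as Chars.startswith on the dropped list (exact there).
def pvMatchesB (u k : List Char) : List Int :=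
  (PySem.List.pyRange 0 ((u.length : Int) - (k.length : Int) + 1) 1).filter
    (fun i => PySem.Chars.startswith (u.drop i.toNat) k)

-- one step of B's second pass: 'if i >= last_end: positions.append(i); last_end = i + L'
def pvStepB (L : Int) (st : List Int × Int) (i : Int) : List Int × Int :=
  if st.2 ≤ i then (st.1 ++ [i], i + L) else st

def keyword_finder_alt (utterances : List String) (keyword : String) : List (List Int) :=
  utterances.map (fun u =>
    ((pvMatchesB u.toList keyword.toList).foldl
      (pvStepB (keyword.toList.length : Int)) (([] : List Int), (0 : Int))).1)

-- ===== PRECONDITION & SPEC =====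
-- Pre_ excludes only keyword = "" with a nonempty utterance list, on which A
-- loops forever: find("", start) returns start and start advances by len("") = 0.
def Pre_keyword_finder (utterances : List String) (keyword : String) : Prop := keyword ≠ "" ∨ utterances = []
instance (utterances : List String) (keyword : String) : Decidable (Pre_keyword_finder utterances keyword) := by unfold Pre_keyword_finder; infer_instance

def pvWitness_keyword_finder : List String × String := (["ab cab ab", "xyz"], "ab")

def Spec_keyword_finder (utterances : List String) (keyword : String) (out : List (List Int)) : Prop := out = keyword_finder_alt utterances keyword
instance (utterances : List String) (keyword : String) (out : List (List Int)) : Decidable (Spec_keyword_finder utterances keyword out) := by unfold Spec_keyword_finder; infer_instance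

-- ===== CLAIM (what is proved, stated in full; the proofs are below) =====
def Claim_equal_keyword_finder : Prop := ∀ (utterances : List String) (keyword : String), Dom_keyword_finder utterances keyword → Pre_keyword_finder utterances keyword → Spec_keyword_finder utterances keyword (keyword_finder utterances keyword)

-- ===== LEMMAS AND PROOFS =====

-- Fuel-free reference scan: advance by 1 position at a time, emit a position and jump
-- by k.length on a match (the 'k = []' guard is for termination only, never reached
-- when k ≠ []).  Both ports are reduced to it.
def pvF (u k : List Char) (i : Nat) (acc : List Int) : List Int :=
  if i + k.length ≤ u.length then
    if k = [] then acc
    else if (u.drop i).take k.length = k then pvF u k (i + k.length) (acc ++ [(i : Int)])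
    else pvF u k (i + 1) acc
  else acc
termination_by u.length - i
decreasing_by
  · have hkp : 0 < k.length := List.length_pos_of_ne_nil ‹¬k = []›
    omega
  · have hkp : 0 < k.length := List.length_pos_of_ne_nil ‹¬k = []›
    omega

lemma pvF_stop (u k : List Char) :
    ∀ n i acc, u.length - i < n → (∀ j, i ≤ j → ¬ k <+: u.drop j) → pvF u k i acc = acc := by
  intro n
  induction n with
  | zero => intro i acc h _; exact absurd h (by omega)
  | succ n ih =>
    intro i acc hn hno
    rw [pvF]
    by_cases hle : i + k.length ≤ u.length
    · rw [if_pos hle]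
      have hk : k ≠ [] := by
        intro h
        exact hno i le_rfl (by simp [h])
      rw [if_neg hk]
      have hne : (u.drop i).take k.length ≠ k := by
        intro h
        exact hno i le_rfl (List.prefix_iff_eq_take.mpr h.symm)
      rw [if_neg hne]
      have hkp := List.length_pos_of_ne_nil hk
      exact ih (i + 1) acc (by omega) (fun j hj => hno j (by omega))
    · rw [if_neg hle]

lemma pvF_skip (u k : List Char) (hk : k ≠ []) (p : Nat)
    (hp : k <+: u.drop p) :
    ∀ n i acc, p - i < n → i ≤ p → (∀ j, i ≤ j → j < p → ¬ k <+: u.drop j) →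
      pvF u k i acc = pvF u k (p + k.length) (acc ++ [(p : Int)]) := by
  have hplen : p + k.length ≤ u.length := by
    have := hp.length_le
    simp only [List.length_drop] at this
    have hkp := List.length_pos_of_ne_nil hk
    omega
  intro n
  induction n with
  | zero => intro i acc h _ _; exact absurd h (by omega)
  | succ n ih =>
    intro i acc hn hip hno
    rcases Nat.eq_or_lt_of_le hip with heq | hlt
    · subst heq
      rw [pvF, if_pos hplen, if_neg hk,
        if_pos (List.prefix_iff_eq_take.mp hp).symm]
    · have hkp := List.length_pos_of_ne_nil hk
      rw [pvF, if_pos (by omega), if_neg hk]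
      have hne : (u.drop i).take k.length ≠ k := by
        intro h
        exact hno i le_rfl hlt (List.prefix_iff_eq_take.mpr h.symm)
      rw [if_neg hne]
      exact ih (i + 1) acc (by omega) (by omega) (fun j hj => hno j (by omega))

lemma pvFindLoopA_eq_pvF (u k : List Char) (hk : k ≠ []) :
    ∀ fa (s : Nat) acc, s ≤ u.length → u.length + 1 - s ≤ fa →
      pvFindLoopA u k fa (s : Int) acc = pvF u k s acc := by
  intro fa
  induction fa with
  | zero => intro s acc hs h; exact absurd h (by omega)
  | succ fa ih =>
    intro s acc hs h
    simp only [pvFindLoopA]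
    by_cases hpos : PySem.Chars.findFrom u k (s : Int) = -1
    · rw [if_pos hpos]
      have hninf : ¬ k <:+: u.drop s :=
        (PySem.Chars.findFrom_natCast_eq_neg_one_iff u k s hs).mp hpos
      refine (pvF_stop u k (u.length + 1 - s) s acc (by omega) ?_).symm
      intro j hj hpre
      have hsuf := (List.drop_suffix (j - s) (u.drop s)).isInfix
      rw [List.drop_drop, show s + (j - s) = j from by omega] at hsuf
      exact hninf (hpre.isInfix.trans hsuf)
    · rw [if_neg hpos]
      obtain ⟨hge, hpre, hmin⟩ := PySem.Chars.findFrom_natCast_spec u k s hs hpos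
      set pos := PySem.Chars.findFrom u k (s : Int) with hposdef
      have hpos0 : 0 ≤ pos := le_trans (by exact_mod_cast Int.natCast_nonneg s) hge
      have hcast : pos = ((pos.toNat : Nat) : Int) := (Int.toNat_of_nonneg hpos0).symm
      have hsle : s ≤ pos.toNat := by omega
      have hkp := List.length_pos_of_ne_nil hk
      have hplen : pos.toNat + k.length ≤ u.length := by
        have := hpre.length_le
        simp only [List.length_drop] at this
        omega
      have hstep : pos + (k.length : Int) = ((pos.toNat + k.length : Nat) : Int) := by
        push_cast; omega
      rw [hstep, show [pos] = [((pos.toNat : Nat) : Int)] from by rw [Int.toNat_of_nonneg hpos0]]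
      rw [ih (pos.toNat + k.length) (acc ++ [(pos.toNat : Int)]) (by omega) (by omega)]
      exact (pvF_skip u k hk pos.toNat hpre (u.length + 1) s acc (by omega) hsle
        (fun j hj1 hj2 => hmin j hj1 hj2)).symm

-- ----- B side -----

-- the Nat-indexed tail of B's match list: all match positions in [e, N)
def pvNatMatches (u k : List Char) (N e : Nat) : List Nat :=
  (List.range' e (N - e)).filter (fun j => PySem.Chars.startswith (u.drop j) k)

-- B's greedy pass ignores positions below the current last_end
lemma pvStepB_skip (L : Int) :
    ∀ (l rest : List Int) (acc : List Int) (e : Int), (∀ x ∈ l, x < e) →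
      (l ++ rest).foldl (pvStepB L) (acc, e) = rest.foldl (pvStepB L) (acc, e) := by
  intro l
  induction l with
  | nil => intro rest acc e _; rfl
  | cons x l ih =>
    intro rest acc e hlt
    have hx : ¬ e ≤ x := not_le.mpr (hlt x (by simp))
    simp only [List.cons_append, List.foldl_cons, pvStepB, if_neg hx]
    exact ih rest acc e (fun y hy => hlt y (by simp [hy]))

lemma pvGreedy_eq_pvF (u k : List Char) (hk : k ≠ []) (hLu : k.length ≤ u.length) :
    ∀ n e acc, (u.length - k.length + 1) - e < n →
      (((pvNatMatches u k (u.length - k.length + 1) e).map (fun (j : Nat) => (j : Int))).foldl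
        (pvStepB (k.length : Int)) (acc, (e : Nat))).1 = pvF u k e acc := by
  have hkp := List.length_pos_of_ne_nil hk
  set N := u.length - k.length + 1 with hN
  intro n
  induction n with
  | zero => intro e acc h; exact absurd h (by omega)
  | succ n ih =>
    intro e acc hn
    by_cases heN : e < N
    · have hsplit : N - e = (N - (e + 1)) + 1 := by omega
      by_cases hm : PySem.Chars.startswith (u.drop e) k = true
      · -- match at e: B appends e and then skips everything below e + k.length
        have hpre : k <+: u.drop e := (PySem.Chars.startswith_iff _ _).mp hm
        have hstep1 : (pvNatMatches u k N e).map (fun (j : Nat) => (j : Int)) =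
            ((e : Int)) :: (pvNatMatches u k N (e + 1)).map (fun (j : Nat) => (j : Int)) := by
          unfold pvNatMatches
          rw [hsplit, List.range'_succ, List.filter_cons, if_pos hm, List.map_cons]
        rw [hstep1, List.foldl_cons]
        have htake : pvStepB (k.length : Int) (acc, (e : Int)) (e : Int) =
            (acc ++ [(e : Int)], (e : Int) + (k.length : Int)) := by
          simp [pvStepB]
        rw [htake]
        -- split [e+1, N) at m = min (e + k.length) N; positions below e + k.length are skipped
        set m := min (e + k.length) N with hmdef
        have hsplit2 : List.range' (e + 1) (N - (e + 1)) =
            List.range' (e + 1) (m - (e + 1)) ++ List.range' m (N - m) := by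
          have h := @List.range'_append_1 (e + 1) (m - (e + 1)) (N - m)
          rw [show (e + 1) + (m - (e + 1)) = m from by omega] at h
          rw [show N - (e + 1) = (m - (e + 1)) + (N - m) from by omega]
          exact h.symm
        have hrest : pvNatMatches u k N (e + 1) =
            (List.range' (e + 1) (m - (e + 1))).filter (fun j => PySem.Chars.startswith (u.drop j) k)
              ++ pvNatMatches u k N m := by
          unfold pvNatMatches
          rw [hsplit2, List.filter_append]
        rw [hrest, List.map_append]
        rw [pvStepB_skip (k.length : Int) _ _ _ _ (by
          intro x hx
          simp only [List.mem_map, List.mem_filter, List.mem_range'_1] at hx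
          obtain ⟨j, ⟨⟨hj1, hj2⟩, _⟩, rfl⟩ := hx
          have : j < e + k.length := by omega
          omega)]
        -- the remaining list is exactly the matches from e + k.length on
        have htail : pvNatMatches u k N m = pvNatMatches u k N (e + k.length) := by
          rcases Nat.lt_or_ge N (e + k.length) with hlt | hle
          · unfold pvNatMatches
            rw [show N - m = 0 from by omega, show N - (e + k.length) = 0 from by omega]
            simp
          · rw [hmdef, min_eq_left hle]
        rw [htail]
        have hcast : (e : Int) + (k.length : Int) = ((e + k.length : Nat) : Int) := by omega
        rw [hcast]
        rw [pvF, if_pos (by omega), if_neg hk, if_pos (List.prefix_iff_eq_take.mp hpre).symm]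
        exact ih (e + k.length) (acc ++ [(e : Int)]) (by omega)
      · -- no match at e: both sides move to e + 1
        have hstep1 : pvNatMatches u k N e = pvNatMatches u k N (e + 1) := by
          unfold pvNatMatches
          rw [hsplit, List.range'_succ, List.filter_cons, if_neg hm]
        have hne : (u.drop e).take k.length ≠ k := by
          intro h
          exact hm ((PySem.Chars.startswith_iff _ _).mpr (List.prefix_iff_eq_take.mpr h.symm))
        rw [hstep1]
        rw [pvF, if_pos (by omega), if_neg hk, if_neg hne]
        -- state (acc, e) vs (acc, e+1): matches from e+1 are all ≥ e+1 > e, so the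
        -- first comparison behaves identically; formally, skip nothing and note the
        -- fold from (acc, e) equals the fold from (acc, e+1) on this list
        have hsame : ∀ (l : List Nat) (acc' : List Int) (a b : Int),
            (∀ x ∈ l, a ≤ (x : Int) ↔ b ≤ (x : Int)) →
            ((l.map (fun (j : Nat) => (j : Int))).foldl (pvStepB (k.length : Int)) (acc', a)).1 =
            ((l.map (fun (j : Nat) => (j : Int))).foldl (pvStepB (k.length : Int)) (acc', b)).1 := by
          intro l
          induction l with
          | nil => intro acc' a b _; rfl
          | cons x l ihl =>
            intro acc' a b hab
            simp only [List.map_cons, List.foldl_cons, pvStepB]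
            by_cases hax : a ≤ (x : Int)
            · rw [if_pos hax, if_pos ((hab x (by simp)).mp hax)]
            · rw [if_neg hax, if_neg (fun hbx => hax ((hab x (by simp)).mpr hbx))]
              exact ihl acc' a b (fun y hy => hab y (by simp [hy]))
        rw [hsame _ acc (e : Int) ((e + 1 : Nat) : Int) (by
          intro x hx
          unfold pvNatMatches at hx
          simp only [List.mem_filter, List.mem_range'_1] at hx
          push_cast
          omega)]
        exact ih (e + 1) acc (by omega)
    · -- e ≥ N: no positions left, and pvF's guard fails
      have h0 : N - e = 0 := by omega
      unfold pvNatMatches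
      rw [h0]
      simp only [List.range'_zero, List.filter_nil, List.map_nil, List.foldl_nil]
      rw [pvF, if_neg (by omega)]

-- B's Int match list is the Nat one, cast
lemma pvMatchesB_eq (u k : List Char) (hLu : k.length ≤ u.length) :
    pvMatchesB u k = (pvNatMatches u k (u.length - k.length + 1) 0).map (fun (j : Nat) => (j : Int)) := by
  unfold pvMatchesB pvNatMatches
  rw [PySem.List.pyRange_one]
  have hcnt : (((u.length : Int) - (k.length : Int) + 1) - 0).toNat = u.length - k.length + 1 := by
    omega
  rw [hcnt]
  have hfn : (fun (t : Nat) => (0 : Int) + (t : Int)) = (fun (j : Nat) => (j : Int)) := by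
    funext t; ring
  rw [hfn, List.filter_map, List.range_eq_range', Nat.sub_zero]
  simp only [Function.comp_def, Int.toNat_natCast]


-- ===== VERDICT (by name: the statement is the Claim_ definition above) =====
theorem keyword_finder_spec : Claim_equal_keyword_finder := by
  intro utterances keyword _ hpre
  unfold Spec_keyword_finder keyword_finder keyword_finder_alt
  rcases hpre with hpre | hnil
  swap
  · subst hnil; rfl
  refine List.map_congr_left (fun u _ => ?_)
  have hk : keyword.toList ≠ [] := by
    simpa [String.toList_eq_nil_iff] using hpre
  have hkp := List.length_pos_of_ne_nil hk
  have hA := pvFindLoopA_eq_pvF u.toList keyword.toList hk (u.toList.length + 1) 0 [] (by omega) (by omega)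
  simp only [Nat.cast_zero] at hA
  rw [hA]
  by_cases hLu : keyword.toList.length ≤ u.toList.length
  · rw [pvMatchesB_eq u.toList keyword.toList hLu]
    have hB := pvGreedy_eq_pvF u.toList keyword.toList hk hLu
      (u.toList.length - keyword.toList.length + 2) 0 [] (by omega)
    simp only [Nat.cast_zero] at hB
    exact hB.symm
  · -- keyword longer than the utterance: no matches on either side
    have hM : pvMatchesB u.toList keyword.toList = [] := by
      unfold pvMatchesB
      rw [PySem.List.pyRange_one_eq_nil (by omega)]
      rfl
    rw [hM, pvF, if_neg (by omega)]
    rfl
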